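-- pv_equiv track=rewrite | github.com/rishabhmonga/practice | leet/SimpleWords.py | simpleWords
-- ===== SOURCE A (Python) =====
-- def is_compound_word(word, vocabulary, depth=0):
--     if len(vocabulary) < 1:
--         return False
--     if len(word) < 1:
--         return False
--
--     # word_partition[i] will be True if substring of word[0:i-1] is in my vocabulary
--     word_partition = [False for _ in range(len(word) + 1)]
--     for i in range(1, len(word)):
--         # current substring is word[0:i]
--
--
--         # if the current substring if not set in the word_partition map,
--         # then check if it is present in the vocabulary
--         if word_partition[i] is False and word[0:i] in vocabulary:
--             word_partition[i] = True
--
--         # if it is present in the vocabulary then check for all substrings starting from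
--         # the (i+1)th character and set results in the word_partition
--         if word_partition[i] is True:
--             # checking the last prefix
--             if i == len(word):
--                 return True
--             for j in range(i + 1, len(word) + 1):
--                 # similarly if the substring [i:j] is not set in the word_partition,
--                 # then check if it is part of vocabulary
--                 if word_partition[j] is False and word[i:j] in vocabulary:
--                     word_partition[j] = True
--                 # since we reached the end of the word and substring part of vocabulary
--                 # we can return True
--                 if j == len(word) and word_partition[j] is True:
--                     return True
--     return False
--
-- def simpleWords(words):
--     if words is None:
--         return None
--     if len(words) < 1:
--         return []
--
--     simple_words = []
--     vocab = set(words)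
--     for word in words:
--         if not is_compound_word(word, vocab):
--             simple_words.append(word)
--     return simple_words
-- ===== SOURCE B (Python) =====
-- def simpleWords(words):
--     if words is None:
--         return None
--     if not words:
--         return []
--     # Build a trie over the vocabulary: parallel arrays of terminal flags and child maps.
--     term = [False]
--     children = [{}]
--     for w in words:
--         node = 0
--         for ch in w:
--             nxt = children[node].get(ch)
--             if nxt is None:
--                 term.append(False)
--                 children.append({})
--                 nxt = len(term) - 1
--                 children[node][ch] = nxt
--             node = nxt
--         term[node] = True
--     result = []
--     for w in words:
--         n = len(w)
--         # reach[i]: w[:i] is a concatenation of vocabulary words (trivially for i = 0)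
--         reach = [True] + [False] * n
--         compound = False
--         for i in range(n):
--             if reach[i]:
--                 node = 0
--                 for j in range(i, n):
--                     node = children[node].get(w[j])
--                     if node is None:
--                         break
--                     if term[node]:
--                         if j + 1 < n:
--                             reach[j + 1] = True
--                         elif i > 0:
--                             compound = True
--         if not compound:
--             result.append(w)
--     return result
-- ===== Notes on version B (the rewrite author's own statement) =====
-- stated objective: alternative
-- what changed: B builds a trie over the vocabulary once (parallel terminal/children arrays) and decides each word by a forward reachability scan whose inner loop walks the trie character by character, finding all vocabulary pieces that start at a position in one walk, replacing A's word-partition scheme that slices O(L^2) substrings per word and tests each against a hash set.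
import Mathlib
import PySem

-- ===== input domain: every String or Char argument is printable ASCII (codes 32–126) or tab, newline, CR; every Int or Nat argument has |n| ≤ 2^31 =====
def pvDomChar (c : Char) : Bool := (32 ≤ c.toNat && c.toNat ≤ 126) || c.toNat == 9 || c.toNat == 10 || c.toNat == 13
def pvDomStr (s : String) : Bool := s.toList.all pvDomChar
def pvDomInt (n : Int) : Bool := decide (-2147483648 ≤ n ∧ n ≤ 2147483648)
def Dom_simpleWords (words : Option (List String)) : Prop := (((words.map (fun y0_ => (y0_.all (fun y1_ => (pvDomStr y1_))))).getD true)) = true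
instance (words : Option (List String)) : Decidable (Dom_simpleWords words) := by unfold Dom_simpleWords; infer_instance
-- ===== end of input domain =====

-- B builds a trie over the vocabulary once and decides each word by a forward reachability
-- scan that walks the trie (no substring slicing or set lookups), instead of A's per-substring
-- set-membership word-partition scheme (objective: alternative).


-- ===== PORT A =====
-- Ports work on word.toList; every Python slice below has natural bounds 0 ≤ a ≤ b ≤ len(word),
-- where word[a:b] is exactly (toList.drop a).take (b-a), and range(a,b) with a ≤ b is List.range' a (b-a).
-- 'sub in vocabulary' is membership of the substring in the Python set of words (pvMemV).
def pvMemV (vocab : PySem.Set String) (cs : List Char) : Bool := PySem.Set.contains vocab (String.ofList cs)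

-- inner 'for j in range(i+1, len(word)+1)' loop; none = 'return True'
def pvInnerA (vocab : PySem.Set String) (cs : List Char) (n i : Nat) :
    List Nat → List Bool → Option (List Bool)
  | [], part => some part
  | j :: js, part =>
    let part' := if (part.getD j false == false) && pvMemV vocab ((cs.drop i).take (j - i)) then
        part.set j true else part
    if (j == n) && (part'.getD j false == true) then none
    else pvInnerA vocab cs n i js part'

-- outer 'for i in range(1, len(word))' loop; true as soon as the Python returns True
def pvOuterA (vocab : PySem.Set String) (cs : List Char) (n : Nat) :
    List Nat → List Bool → Bool
  | [], _ => false
  | i :: is, part =>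
    let part' := if (part.getD i false == false) && pvMemV vocab (cs.take i) then
        part.set i true else part
    if part'.getD i false == true then
      if i == n then true   -- Python's dead 'if i == len(word): return True', kept
      else
        match pvInnerA vocab cs n i (List.range' (i+1) (n - i)) part' with
        | none => true
        | some part'' => pvOuterA vocab cs n is part''
    else pvOuterA vocab cs n is part'

def isCompoundWord (word : String) (vocab : PySem.Set String) : Bool :=
  if vocab.length < 1 then false
  else if word.toList.length < 1 then false
  else
    pvOuterA vocab word.toList word.toList.length
      (List.range' 1 (word.toList.length - 1))
      (List.replicate (word.toList.length + 1) false)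

def simpleWords (words : Option (List String)) : Option (List String) :=
  match words with
  | none => none
  | some ws =>
    if ws.length < 1 then some []
    else
      let vocab := PySem.Set.ofList ws
      some (ws.foldl (fun acc w => if !(isCompoundWord w vocab) then acc ++ [w] else acc) [])

-- ===== PORT B =====
-- B's trie lives in two parallel lists, exactly as in Source B: 'term' (terminal flags) and
-- 'children' (per-node child dict, char → node index).  'for ch in w' insertion loop:
def pvInsertB : List Bool → List (PySem.Dict Char Nat) → Nat → List Char →
    List Bool × List (PySem.Dict Char Nat)
  | term, children, node, [] => (term.set node true, children)
  | term, children, node, ch :: rest =>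
    match (children.getD node PySem.Dict.empty).get? ch with
    | some nxt => pvInsertB term children nxt rest
    | none =>
      pvInsertB (term ++ [false])
        ((children ++ [PySem.Dict.empty]).set node
          ((children.getD node PySem.Dict.empty).insert ch term.length))
        term.length rest

-- 'for w in words' build loop
def pvBuildTrie (ws : List String) : List Bool × List (PySem.Dict Char Nat) :=
  ws.foldl (fun tc w => pvInsertB tc.1 tc.2 0 w.toList) ([false], [PySem.Dict.empty])

-- inner 'for j in range(i, n)' trie walk (returning at the first missing edge = 'break')
def pvWalkB (term : List Bool) (children : List (PySem.Dict Char Nat))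
    (cs : List Char) (n i : Nat) : Nat → List Nat → List Bool → Bool → List Bool × Bool
  | _, [], reach, comp => (reach, comp)
  | node, j :: js, reach, comp =>
    match (children.getD node PySem.Dict.empty).get? (cs.getD j ' ') with
    | none => (reach, comp)
    | some nd =>
      if term.getD nd false then
        if j + 1 < n then pvWalkB term children cs n i nd js (reach.set (j+1) true) comp
        else if 0 < i then pvWalkB term children cs n i nd js reach true
        else pvWalkB term children cs n i nd js reach comp
      else pvWalkB term children cs n i nd js reach comp

-- outer 'for i in range(n)' loop over start positions
def pvCheckB (term : List Bool) (children : List (PySem.Dict Char Nat))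
    (cs : List Char) (n : Nat) : List Nat → List Bool → Bool → Bool
  | [], _, comp => comp
  | i :: is, reach, comp =>
    if reach.getD i false then
      let rc := pvWalkB term children cs n i 0 (List.range' i (n - i)) reach comp
      pvCheckB term children cs n is rc.1 rc.2
    else pvCheckB term children cs n is reach comp

def isCompoundB (term : List Bool) (children : List (PySem.Dict Char Nat)) (w : String) : Bool :=
  pvCheckB term children w.toList w.toList.length (List.range' 0 w.toList.length)
    (true :: List.replicate w.toList.length false) false

def simpleWords_alt (words : Option (List String)) : Option (List String) :=
  match words with
  | none => none
  | some ws =>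
    if ws = [] then some []
    else
      let tc := pvBuildTrie ws
      some (ws.foldl (fun acc w => if !(isCompoundB tc.1 tc.2 w) then acc ++ [w] else acc) [])

-- ===== PRECONDITION & SPEC =====
def Spec_simpleWords (words : Option (List String)) (out : Option (List String)) : Prop := out = simpleWords_alt words
instance (words : Option (List String)) (out : Option (List String)) : Decidable (Spec_simpleWords words out) := by unfold Spec_simpleWords; infer_instance

-- ===== CLAIM (what is proved, stated in full; the proofs are below) =====
def Claim_equal_simpleWords : Prop := ∀ (words : Option (List String)), Dom_simpleWords words → Spec_simpleWords words (simpleWords words)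

-- ===== LEMMAS AND PROOFS =====

-- cs is a concatenation of one or more nonempty vocabulary pieces
inductive pvBrk (m : List Char → Bool) : List Char → Prop where
  | single : ∀ cs, cs ≠ [] → m cs = true → pvBrk m cs
  | cons : ∀ p cs, p ≠ [] → m p = true → pvBrk m cs → pvBrk m (p ++ cs)

-- cs splits into >= 2 nonempty vocabulary pieces, phrased by its last split point
def pvCompound (m : List Char → Bool) (cs : List Char) : Prop :=
  ∃ l, 1 ≤ l ∧ l < cs.length ∧ pvBrk m (cs.take l) ∧ m (cs.drop l) = true

theorem pvBrk_ne_nil {m : List Char → Bool} {c : List Char} (h : pvBrk m c) : c ≠ [] := by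
  induction h with
  | single cs h1 h2 => exact h1
  | cons p cs hp hm hb ih => exact List.append_ne_nil_of_left_ne_nil hp cs

theorem pvBrk_append_piece {m : List Char → Bool} {a b : List Char}
    (ha : pvBrk m a) (hb : b ≠ []) (hm : m b = true) : pvBrk m (a ++ b) := by
  induction ha with
  | single cs h1 h2 => exact .cons cs b h1 h2 (.single b hb hm)
  | cons p cs hp hmp hbrk ih => rw [List.append_assoc]; exact .cons p (cs ++ b) hp hmp ih

-- last-piece decomposition
theorem pvBrk_last {m : List Char → Bool} {c : List Char} :
    pvBrk m c ↔ ((m c = true ∧ c ≠ []) ∨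
      ∃ l, 1 ≤ l ∧ l < c.length ∧ pvBrk m (c.take l) ∧ m (c.drop l) = true) := by
  constructor
  · intro h
    induction h with
    | single cs h1 h2 => exact Or.inl ⟨h2, h1⟩
    | cons p cs hp hmp hbrk ih =>
      have hplen : p.length ≠ 0 := fun h0 => hp (List.length_eq_zero_iff.mp h0)
      have hclen : cs.length ≠ 0 := fun h0 => (pvBrk_ne_nil hbrk) (List.length_eq_zero_iff.mp h0)
      rcases ih with ⟨hmc, hcne⟩ | ⟨l, hl1, hl2, hbl, hml⟩
      · refine Or.inr ⟨p.length, by omega, by simp; omega, ?_, ?_⟩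
        · rw [List.take_left]; exact .single p hp hmp
        · rw [List.drop_left]; exact hmc
      · refine Or.inr ⟨p.length + l, by omega, by simp; omega, ?_, ?_⟩
        · rw [List.take_add, List.take_left, List.drop_left]
          exact .cons p (cs.take l) hp hmp hbl
        · rw [← List.drop_drop, List.drop_left]; exact hml
  · rintro (⟨hmc, hcne⟩ | ⟨l, hl1, hl2, hbl, hml⟩)
    · exact .single c hcne hmc
    · have hd : c.drop l ≠ [] := by
        intro h0; have := congrArg List.length h0; simp at this; omega
      have := pvBrk_append_piece hbl hd hml
      rwa [List.take_append_drop] at this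

-- invariant of A's outer loop at split point i
def pvInvA (m : List Char → Bool) (cs : List Char) (i : Nat) (part : List Bool) : Prop :=
  part.length = cs.length + 1 ∧
  part.getD cs.length false = false ∧
  (∀ j, 1 ≤ j → j < i → (part.getD j false = true ↔ pvBrk m (cs.take j))) ∧
  (∀ j, i ≤ j → j ≤ cs.length → (part.getD j false = true ↔
      ∃ l, 1 ≤ l ∧ l < i ∧ pvBrk m (cs.take l) ∧ m ((cs.drop l).take (j - l)) = true))

theorem pvGetD_set_self {α : Type} (l : List α) (j : Nat) (v d : α) (h : j < l.length) :
    (l.set j v).getD j d = v := by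
  simp [List.getD_eq_getElem?_getD, h]

theorem pvGetD_set_ne {α : Type} (l : List α) (j t : Nat) (v d : α) (h : t ≠ j) :
    (l.set j v).getD t d = l.getD t d := by
  simp [List.getD_eq_getElem?_getD, List.getElem?_set_ne (Ne.symm h)]

theorem pvGetD_replicate (n j : Nat) : (List.replicate n false).getD j false = false := by
  simp [List.getD_eq_getElem?_getD, List.getElem?_replicate]
  split <;> rfl

theorem pvInnerA_char (vocab : PySem.Set String) (cs : List Char) (i : Nat) :
    ∀ (k j : Nat) (part : List Bool), j + k = cs.length → i < j →
    part.length = cs.length + 1 → part.getD cs.length false = false →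
    (pvMemV vocab (cs.drop i) = true →
      pvInnerA vocab cs cs.length i (List.range' j (cs.length + 1 - j)) part = none) ∧
    (pvMemV vocab (cs.drop i) = false →
      ∃ part', pvInnerA vocab cs cs.length i (List.range' j (cs.length + 1 - j)) part = some part' ∧
        part'.length = cs.length + 1 ∧
        ∀ t, part'.getD t false =
          (part.getD t false ||
            (decide (j ≤ t) && decide (t ≤ cs.length) && pvMemV vocab ((cs.drop i).take (t - i))))) := by
  intro k
  induction k with
  | zero =>
    intro j part hjk hij hlen hn
    have hj : j = cs.length := by omega
    subst hj
    have hto : (cs.drop i).take (cs.length - i) = cs.drop i := by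
      have h1 : cs.length - i = (cs.drop i).length := by simp
      rw [h1, List.take_length]
    have hrw : cs.length + 1 - cs.length = 1 := by omega
    rw [hrw, List.range'_one]
    constructor
    · intro hmem
      simp only [pvInnerA, hn, hto, hmem]
      simp only [beq_self_eq_true, Bool.true_and, Bool.and_true, if_true, beq_iff_eq]
      have hss := pvGetD_set_self part cs.length true false (by omega)
      rw [List.getD_eq_getElem?_getD] at hss
      simp [hss]
    · intro hmem
      refine ⟨part, ?_, hlen, ?_⟩
      · have hn' := hn
        rw [List.getD_eq_getElem?_getD] at hn'
        simp [pvInnerA, hto, hmem, hn']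
      · intro t
        by_cases ht : t = cs.length
        · subst ht
          rw [hto]
          simp [hmem]
        · have h1 : (decide (cs.length ≤ t) : Bool) = false ∨ (decide (t ≤ cs.length) : Bool) = false := by
            by_cases ha : cs.length ≤ t
            · right; simp only [decide_eq_false_iff_not]; omega
            · left; simp [ha]
          rcases h1 with h1 | h1 <;> simp [h1]
  | succ k ih =>
    intro j part hjk hij hlen hn
    have hne : j ≠ cs.length := by omega
    have hrw : cs.length + 1 - j = (cs.length - j) + 1 := by omega
    rw [hrw, List.range'_succ]
    simp only [pvInnerA]
    rw [if_neg (by simp [hne])]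
    have hrw2 : cs.length - j = cs.length + 1 - (j + 1) := by omega
    set part1 := (if (part.getD j false == false) && pvMemV vocab ((cs.drop i).take (j - i)) then
        part.set j true else part) with hpart1
    have hlen1 : part1.length = cs.length + 1 := by
      rw [hpart1]; split <;> simp [hlen]
    have hget1 : ∀ t, part1.getD t false =
        (part.getD t false || (decide (t = j) && pvMemV vocab ((cs.drop i).take (t - i)))) := by
      intro t
      by_cases ht : t = j
      · subst ht
        rw [hpart1]
        by_cases hpj : part.getD t false = true
        · have hc : ((part.getD t false == false) && pvMemV vocab ((cs.drop i).take (t - i))) = false := by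
            rw [hpj]; rfl
          rw [if_neg (by rw [hc]; simp), hpj]; simp
        · have hpj' : part.getD t false = false := by simpa using hpj
          rw [hpj']
          by_cases hm : pvMemV vocab ((cs.drop i).take (t - i)) = true
          · rw [if_pos (by rw [hm]; rfl)]
            rw [pvGetD_set_self part t true false (by omega)]
            simp [hm]
          · have hm' : pvMemV vocab ((cs.drop i).take (t - i)) = false := by simpa using hm
            rw [if_neg (by simp [hm']), hpj', hm']
            simp
      · rw [hpart1]
        split
        · rw [pvGetD_set_ne part j t true false ht]; simp [ht]
        · simp [ht]
    have hn1 : part1.getD cs.length false = false := by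
      rw [hget1 cs.length, hn]
      simp [Ne.symm hne]
    have IH := ih (j + 1) part1 (by omega) (by omega) hlen1 hn1
    rw [hrw2]
    constructor
    · intro hmem
      exact IH.1 hmem
    · intro hmem
      obtain ⟨part2, heq, hlen2, hchar⟩ := IH.2 hmem
      refine ⟨part2, heq, hlen2, ?_⟩
      intro t
      rw [hchar, hget1]
      by_cases ht : t = j
      · subst ht
        simp [Nat.le_of_lt (by omega : t < cs.length)]
      · have h1 : (decide (t = j) : Bool) = false := by simp [ht]
        have h2 : (decide (j ≤ t) : Bool) = decide (j + 1 ≤ t) := by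
          rcases Nat.lt_or_ge t j with h | h
          · simp only [decide_eq_decide]; omega
          · simp only [decide_eq_decide]; omega
        rw [h1, h2]
        simp

theorem pvOuterA_char (vocab : PySem.Set String) (cs : List Char) :
    ∀ (k i : Nat) (part : List Bool), i + k = cs.length → 1 ≤ i →
    pvInvA (pvMemV vocab) cs i part →
    (pvOuterA vocab cs cs.length (List.range' i (cs.length - i)) part = true ↔
      pvCompound (pvMemV vocab) cs) := by
  intro k
  induction k with
  | zero =>
    intro i part hik h1 hinv
    obtain ⟨hlen, hn, hpre, hsuf⟩ := hinv
    have hi : i = cs.length := by omega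
    subst hi
    rw [Nat.sub_self, List.range'_zero]
    simp only [pvOuterA]
    constructor
    · intro h; exact absurd h (by simp)
    · rintro ⟨l, hl1, hl2, hbl, hml⟩
      have h4 := hsuf cs.length (le_refl _) (le_refl _)
      rw [hn] at h4
      have hex : ∃ l, 1 ≤ l ∧ l < cs.length ∧ pvBrk (pvMemV vocab) (cs.take l) ∧
          pvMemV vocab ((cs.drop l).take (cs.length - l)) = true := by
        refine ⟨l, hl1, hl2, hbl, ?_⟩
        have h5 : cs.length - l = (cs.drop l).length := by simp
        rw [h5, List.take_length]; exact hml
      exact absurd (h4.mpr hex) (by simp)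
  | succ k ih =>
    intro i part hik h1 hinv
    obtain ⟨hlen, hn, hpre, hsuf⟩ := hinv
    have hilt : i < cs.length := by omega
    have hto : (cs.drop i).take (cs.length - i) = cs.drop i := by
      have h5 : cs.length - i = (cs.drop i).length := by simp
      rw [h5, List.take_length]
    have hrw : cs.length - i = k + 1 := by omega
    rw [hrw, List.range'_succ]
    simp only [pvOuterA]
    set part1 := (if (part.getD i false == false) && pvMemV vocab (cs.take i) then
        part.set i true else part) with hpart1
    have hlen1 : part1.length = cs.length + 1 := by rw [hpart1]; split <;> simp [hlen]
    have hget1 : ∀ t, part1.getD t false =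
        (part.getD t false || (decide (t = i) && pvMemV vocab (cs.take t))) := by
      intro t
      by_cases ht : t = i
      · subst ht
        rw [hpart1]
        by_cases hpj : part.getD t false = true
        · rw [if_neg (by rw [hpj]; simp), hpj]; simp
        · have hpj' : part.getD t false = false := by simpa using hpj
          rw [hpj']
          by_cases hm : pvMemV vocab (cs.take t) = true
          · rw [if_pos (by rw [hm]; rfl), pvGetD_set_self part t true false (by omega)]
            simp [hm]
          · have hm' : pvMemV vocab (cs.take t) = false := by simpa using hm
            rw [if_neg (by simp [hm']), hm']
            simp only [Bool.and_false, Bool.or_false]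
            exact hpj'
      · rw [hpart1]
        split
        · rw [pvGetD_set_ne part i t true false ht]; simp [ht]
        · simp [ht]
    have hn1 : part1.getD cs.length false = false := by
      have hne : cs.length ≠ i := by omega
      rw [hget1 cs.length, hn]
      simp [hne]
    have htl : (cs.take i).length = i := by rw [List.length_take]; omega
    have hkey : part1.getD i false = true ↔ pvBrk (pvMemV vocab) (cs.take i) := by
      rw [hget1 i]
      have hsufi := hsuf i (le_refl _) (by omega)
      constructor
      · intro h
        rcases Bool.or_eq_true_iff.mp h with h | h
        · obtain ⟨l, hl1, hl2, hbl, hml⟩ := hsufi.mp h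
          apply pvBrk_last.mpr
          refine Or.inr ⟨l, hl1, by rw [htl]; omega, ?_, ?_⟩
          · rw [List.take_take, min_eq_left (by omega)]; exact hbl
          · rw [List.drop_take]; exact hml
        · rw [Bool.and_eq_true] at h
          exact pvBrk_last.mpr (Or.inl ⟨h.2, List.ne_nil_of_length_pos (by rw [htl]; omega)⟩)
      · intro h
        rcases pvBrk_last.mp h with ⟨hm, _⟩ | ⟨l, hl1, hl2, hbl, hml⟩
        · simp [hm]
        · rw [htl] at hl2
          rw [List.take_take, min_eq_left (by omega)] at hbl
          rw [List.drop_take] at hml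
          have := hsufi.mpr ⟨l, hl1, hl2, hbl, hml⟩
          rw [this]
          simp
    by_cases hbi : part1.getD i false = true
    · have hbrki := hkey.mp hbi
      rw [if_pos (by rw [hbi]; rfl)]
      rw [if_neg (by simp; omega)]
      have hinner := pvInnerA_char vocab cs i k (i+1) part1 (by omega) (by omega) hlen1 hn1
      rw [show cs.length + 1 - (i+1) = cs.length - i from by omega, hrw] at hinner
      by_cases hm : pvMemV vocab (cs.drop i) = true
      · rw [hrw, hinner.1 hm]
        constructor
        · intro _; exact ⟨i, h1, hilt, hbrki, hm⟩
        · intro _; rfl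
      · have hm' : pvMemV vocab (cs.drop i) = false := by simpa using hm
        obtain ⟨part2, heq, hlen2, hchar⟩ := hinner.2 hm'
        rw [hrw, heq]
        show pvOuterA vocab cs cs.length (List.range' (i+1) k) part2 = true ↔
          pvCompound (pvMemV vocab) cs
        rw [show (k : Nat) = cs.length - (i+1) from by omega]
        apply ih (i+1) part2 (by omega) (by omega)
        refine ⟨hlen2, ?_, ?_, ?_⟩
        · rw [hchar cs.length, hn1, hto, hm']
          simp
        · intro j hj1 hj2
          by_cases hji : j = i
          · rw [hji, hchar i]
            have hdd : (decide (i + 1 ≤ i) : Bool) = false := by simp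
            rw [hdd]
            simp only [Bool.false_and, Bool.or_false]
            exact hkey
          · have hjlt : j < i := by omega
            rw [hchar j, hget1 j]
            have hd1 : (decide (i + 1 ≤ j) : Bool) = false := by simp; omega
            have hd3 : (decide (j = i) : Bool) = false := by simp [hji]
            rw [hd1, hd3]
            simp only [Bool.false_and, Bool.or_false]
            exact hpre j hj1 hjlt
        · intro j hj1 hj2
          rw [hchar j, hget1 j]
          have hd1 : (decide (i + 1 ≤ j) : Bool) = true := by simp; omega
          have hd2 : (decide (j ≤ cs.length) : Bool) = true := by simp [hj2]
          have hd3 : (decide (j = i) : Bool) = false := by simp; omega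
          rw [hd1, hd2, hd3]
          simp only [Bool.false_and, Bool.or_false, Bool.true_and]
          constructor
          · intro h
            rcases Bool.or_eq_true_iff.mp h with h | h
            · obtain ⟨l, hl1, hl2, hbl, hml⟩ := (hsuf j (by omega) hj2).mp h
              exact ⟨l, hl1, by omega, hbl, hml⟩
            · exact ⟨i, h1, by omega, hbrki, h⟩
          · rintro ⟨l, hl1, hl2, hbl, hml⟩
            by_cases hli : l = i
            · subst hli
              rw [hml]
              simp
            · have : part.getD j false = true := (hsuf j (by omega) hj2).mpr ⟨l, hl1, by omega, hbl, hml⟩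
              rw [this]
              simp
    · have hbi' : part1.getD i false = false := by simpa using hbi
      have hnb : ¬ pvBrk (pvMemV vocab) (cs.take i) := fun hb => by
        rw [hkey.mpr hb] at hbi'
        simp at hbi'
      rw [if_neg (by rw [hbi']; simp)]
      show pvOuterA vocab cs cs.length (List.range' (i+1) k) part1 = true ↔
        pvCompound (pvMemV vocab) cs
      rw [show (k : Nat) = cs.length - (i+1) from by omega]
      apply ih (i+1) part1 (by omega) (by omega)
      refine ⟨hlen1, hn1, ?_, ?_⟩
      · intro j hj1 hj2
        by_cases hji : j = i
        · subst hji
          constructor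
          · intro h; exact absurd h (by rw [hbi']; simp)
          · intro h; exact absurd h hnb
        · have hjlt : j < i := by omega
          rw [hget1 j]
          have hd3 : (decide (j = i) : Bool) = false := by simp [hji]
          rw [hd3]
          simp only [Bool.false_and, Bool.or_false]
          exact hpre j hj1 hjlt
      · intro j hj1 hj2
        rw [hget1 j]
        have hd3 : (decide (j = i) : Bool) = false := by simp; omega
        rw [hd3]
        simp only [Bool.false_and, Bool.or_false]
        rw [hsuf j (by omega) hj2]
        constructor
        · rintro ⟨l, hl1, hl2, hbl, hml⟩
          exact ⟨l, hl1, by omega, hbl, hml⟩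
        · rintro ⟨l, hl1, hl2, hbl, hml⟩
          by_cases hli : l = i
          · subst hli; exact absurd hbl hnb
          · exact ⟨l, hl1, by omega, hbl, hml⟩

-- ========== B-side: trie correctness ==========

-- follow the trie edges from node v along cs (proof-side view of B's walks)
def pvFollow (children : List (PySem.Dict Char Nat)) : Nat → List Char → Option Nat
  | v, [] => some v
  | v, c :: cs =>
    match (children.getD v PySem.Dict.empty).get? c with
    | none => none
    | some u => pvFollow children u cs

-- 'cs is stored in the trie' seen from node v
def pvLookFrom (term : List Bool) (children : List (PySem.Dict Char Nat)) (v : Nat)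
    (cs : List Char) : Bool :=
  match pvFollow children v cs with
  | some x => term.getD x false
  | none => false

-- structural trie invariant: matching lengths, edges land in [1, len), edges are injective
def pvTInv (term : List Bool) (children : List (PySem.Dict Char Nat)) : Prop :=
  term.length = children.length ∧ 0 < children.length ∧
  (∀ v c u, (children.getD v PySem.Dict.empty).get? c = some u → 1 ≤ u ∧ u < children.length) ∧
  (∀ v c u v' c', (children.getD v PySem.Dict.empty).get? c = some u →
    (children.getD v' PySem.Dict.empty).get? c' = some u → v = v' ∧ c = c')

theorem pvFollow_append (children : List (PySem.Dict Char Nat)) (ds es : List Char) :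
    ∀ v, pvFollow children v (ds ++ es) =
      match pvFollow children v ds with
      | none => none
      | some u => pvFollow children u es := by
  induction ds with
  | nil => intro v; rfl
  | cons c ds ih =>
    intro v
    simp only [List.cons_append, pvFollow]
    cases (children.getD v PySem.Dict.empty).get? c with
    | none => rfl
    | some u => exact ih u

theorem pvLookFrom_some (term : List Bool) (children : List (PySem.Dict Char Nat))
    (v x : Nat) (ds : List Char) (h : pvFollow children v ds = some x) :
    pvLookFrom term children v ds = term.getD x false := by
  simp [pvLookFrom, h]

theorem pvLookFrom_none (term : List Bool) (children : List (PySem.Dict Char Nat))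
    (v : Nat) (ds : List Char) (h : pvFollow children v ds = none) :
    pvLookFrom term children v ds = false := by
  simp [pvLookFrom, h]

theorem pvFollow_preserve (c₁ c₂ : List (PySem.Dict Char Nat))
    (hp : ∀ v c u, (c₁.getD v PySem.Dict.empty).get? c = some u →
      (c₂.getD v PySem.Dict.empty).get? c = some u) :
    ∀ ds v x, pvFollow c₁ v ds = some x → pvFollow c₂ v ds = some x := by
  intro ds
  induction ds with
  | nil => intro v x h; exact h
  | cons c ds ih =>
    intro v x h
    simp only [pvFollow] at h ⊢
    cases hu : (c₁.getD v PySem.Dict.empty).get? c with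
    | none => rw [hu] at h; exact absurd h (by simp)
    | some u => rw [hu] at h; rw [hp v c u hu]; exact ih u x h

theorem pvFollow_ge (c₂ : List (PySem.Dict Char Nat)) (L : Nat)
    (hcl : ∀ v c u, L ≤ v → (c₂.getD v PySem.Dict.empty).get? c = some u → L ≤ u) :
    ∀ ds v x, L ≤ v → pvFollow c₂ v ds = some x → L ≤ x := by
  intro ds
  induction ds with
  | nil => intro v x hv h; cases h; exact hv
  | cons c ds ih =>
    intro v x hv h
    simp only [pvFollow] at h
    cases hu : (c₂.getD v PySem.Dict.empty).get? c with
    | none => rw [hu] at h; exact absurd h (by simp)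
    | some u => rw [hu] at h; exact ih u x (hcl v c u hv hu) h

theorem pvFollow_origin (c₁ c₂ : List (PySem.Dict Char Nat)) (L : Nat)
    (hlen : c₁.length = L)
    (h1 : ∀ v c u, (c₁.getD v PySem.Dict.empty).get? c = some u → 1 ≤ u ∧ u < L)
    (h4 : ∀ v c u, (c₂.getD v PySem.Dict.empty).get? c = some u →
      ((c₁.getD v PySem.Dict.empty).get? c = some u ∨ L ≤ u)) :
    ∀ ds v x, v < L → pvFollow c₂ v ds = some x → x < L →
      pvFollow c₁ v ds = some x := by
  have hcl : ∀ v c u, L ≤ v → (c₂.getD v PySem.Dict.empty).get? c = some u → L ≤ u := by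
    intro v c u hv hu
    rcases h4 v c u hu with h | h
    · have : (c₁.getD v PySem.Dict.empty) = PySem.Dict.empty := by
        rw [List.getD_eq_getElem?_getD, List.getElem?_eq_none (by omega)]; rfl
      rw [this] at h
      simp [pysem] at h
    · exact h
  intro ds
  induction ds with
  | nil => intro v x hv h hx; exact h
  | cons c ds ih =>
    intro v x hv h hx
    simp only [pvFollow] at h ⊢
    cases hu : (c₂.getD v PySem.Dict.empty).get? c with
    | none => rw [hu] at h; exact absurd h (by simp)
    | some u =>
      rw [hu] at h
      rcases h4 v c u hu with hold | hge
      · have hult : u < L := (h1 v c u hold).2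
        rw [hold]
        exact ih u x hult h hx
      · have := pvFollow_ge c₂ L hcl ds u x hge h
        omega

-- paths from the root are injective in an edge-injective trie
theorem pvFollow_root_inj (children : List (PySem.Dict Char Nat))
    (hr : ∀ v c u, (children.getD v PySem.Dict.empty).get? c = some u → 1 ≤ u ∧ u < children.length)
    (hinj : ∀ v c u v' c', (children.getD v PySem.Dict.empty).get? c = some u →
      (children.getD v' PySem.Dict.empty).get? c' = some u → v = v' ∧ c = c') :
    ∀ n ds es x, ds.length ≤ n → pvFollow children 0 ds = some x →
      pvFollow children 0 es = some x → ds = es := by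
  have hend : ∀ (ds : List Char) x, ds ≠ [] → pvFollow children 0 ds = some x →
      ∃ u d ds', ds = ds' ++ [d] ∧ pvFollow children 0 ds' = some u ∧
        (children.getD u PySem.Dict.empty).get? d = some x ∧ 1 ≤ x := by
    intro ds x hne h
    rcases List.eq_nil_or_concat ds with rfl | ⟨ds', d, rfl⟩
    · exact absurd rfl hne
    · simp only [List.concat_eq_append] at h ⊢
      rw [pvFollow_append] at h
      cases hu : pvFollow children 0 ds' with
      | none => rw [hu] at h; exact absurd h (by simp)
      | some u =>
        rw [hu] at h
        simp only [pvFollow] at h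
        cases he : (children.getD u PySem.Dict.empty).get? d with
        | none => rw [he] at h; exact absurd h (by simp)
        | some x' =>
          rw [he] at h
          cases h
          exact ⟨u, d, ds', rfl, hu, he, (hr u d x he).1⟩
  intro n
  induction n with
  | zero =>
    intro ds es x hlen hds hes
    have hdnil : ds = [] := List.length_eq_zero_iff.mp (by omega)
    subst hdnil
    cases hds
    rcases List.eq_nil_or_concat es with rfl | ⟨es', e, rfl⟩
    · rfl
    · simp only [List.concat_eq_append] at hes
      obtain ⟨u, d, es'', heq, _, he, hx⟩ := hend (es' ++ [e]) 0 (by simp) hes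
      omega
  | succ n ih =>
    intro ds es x hlen hds hes
    rcases List.eq_nil_or_concat ds with rfl | ⟨ds', d, rfl⟩
    · cases hds
      rcases List.eq_nil_or_concat es with rfl | ⟨es', e, rfl⟩
      · rfl
      · simp only [List.concat_eq_append] at hes
        obtain ⟨u, d, es'', heq, _, he, hx⟩ := hend (es' ++ [e]) 0 (by simp) hes
        omega
    · simp only [List.concat_eq_append] at hds hlen
      obtain ⟨u, d₀, ds'', hdeq, hdu, hde, hx⟩ := hend (ds' ++ [d]) x (by simp) hds
      have hdd : ds'' = ds' ∧ d₀ = d := by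
        have := List.append_inj' hdeq rfl
        simp at this
        exact ⟨this.1.symm, this.2.symm⟩
      rw [hdd.1] at hdu
      rw [hdd.2] at hde
      rcases List.eq_nil_or_concat es with rfl | ⟨es', e, rfl⟩
      · cases hes; omega
      · simp only [List.concat_eq_append] at hes
        obtain ⟨u', e₀, es'', heeq, heu, hee, _⟩ := hend (es' ++ [e]) x (by simp) hes
        have hee' : es'' = es' ∧ e₀ = e := by
          have := List.append_inj' heeq rfl
          simp at this
          exact ⟨this.1.symm, this.2.symm⟩
        rw [hee'.1] at heu
        rw [hee'.2] at hee
        obtain ⟨huu, hcc⟩ := hinj u d x u' e hde hee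
        subst huu
        have : ds' = es' := ih ds' es' u (by simp at hlen; omega) hdu heu
        rw [this, hcc]

-- full specification of one insertion
theorem pvInsertB_spec :
    ∀ (rest : List Char) (term : List Bool) (children : List (PySem.Dict Char Nat)) (node : Nat),
    term.length = children.length → node < children.length →
    (∀ v c u, (children.getD v PySem.Dict.empty).get? c = some u → 1 ≤ u ∧ u < children.length) →
    (∀ v c u v' c', (children.getD v PySem.Dict.empty).get? c = some u →
      (children.getD v' PySem.Dict.empty).get? c' = some u → v = v' ∧ c = c') →
    (pvInsertB term children node rest).1.length = (pvInsertB term children node rest).2.length ∧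
    children.length ≤ (pvInsertB term children node rest).2.length ∧
    (∀ v c u, (children.getD v PySem.Dict.empty).get? c = some u →
      ((pvInsertB term children node rest).2.getD v PySem.Dict.empty).get? c = some u) ∧
    (∀ v c u, ((pvInsertB term children node rest).2.getD v PySem.Dict.empty).get? c = some u →
      ((children.getD v PySem.Dict.empty).get? c = some u ∨ children.length ≤ u)) ∧
    (∀ v c u, ((pvInsertB term children node rest).2.getD v PySem.Dict.empty).get? c = some u →
      1 ≤ u ∧ u < (pvInsertB term children node rest).2.length) ∧
    (∀ v c u v' c', ((pvInsertB term children node rest).2.getD v PySem.Dict.empty).get? c = some u →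
      ((pvInsertB term children node rest).2.getD v' PySem.Dict.empty).get? c' = some u → v = v' ∧ c = c') ∧
    ∃ f, pvFollow (pvInsertB term children node rest).2 node rest = some f ∧
      f < (pvInsertB term children node rest).2.length ∧
      (pvInsertB term children node rest).1 =
        (term ++ List.replicate ((pvInsertB term children node rest).2.length - children.length) false).set f true := by
  intro rest
  induction rest with
  | nil =>
    intro term children node hlen hnode h1 h2
    simp only [pvInsertB]
    refine ⟨by simpa using hlen, le_refl _, fun v c u h => h, fun v c u h => Or.inl h, h1, h2,
      node, rfl, hnode, ?_⟩
    simp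
  | cons ch rest ih =>
    intro term children node hlen hnode h1 h2
    cases hu : (children.getD node PySem.Dict.empty).get? ch with
    | some nxt =>
      simp only [pvInsertB, hu]
      obtain ⟨c1, c2, c3, c4, c5, c6, f, hf, hflt, hterm⟩ :=
        ih term children nxt hlen (h1 node ch nxt hu).2 h1 h2
      refine ⟨c1, c2, c3, c4, c5, c6, f, ?_, hflt, hterm⟩
      simp only [pvFollow]
      rw [c3 node ch nxt hu]
      exact hf
    | none =>
      simp only [pvInsertB, hu]
      set children1 := ((children ++ [PySem.Dict.empty]).set node
        ((children.getD node PySem.Dict.empty).insert ch term.length)) with hc1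
      set term1 := term ++ [false] with ht1
      have hlen1c : children1.length = children.length + 1 := by simp [hc1]
      have hlen1t : term1.length = children.length + 1 := by simp [ht1, hlen]
      have hLpos : 1 ≤ children.length := by omega
      have happ : ∀ v, (children ++ [PySem.Dict.empty]).getD v PySem.Dict.empty =
          children.getD v PySem.Dict.empty := by
        intro v
        by_cases h : v < children.length
        · rw [List.getD_eq_getElem?_getD, List.getElem?_append_left h,
            ← List.getD_eq_getElem?_getD]
        · have h1 : children.length ≤ v := by omega
          have e1 : children.getD v PySem.Dict.empty = PySem.Dict.empty := by
            rw [List.getD_eq_getElem?_getD, List.getElem?_eq_none h1]; rfl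
          rw [e1]
          by_cases h2 : v = children.length
          · subst h2
            rw [List.getD_eq_getElem?_getD, List.getElem?_append_right (le_refl _)]
            simp
          · rw [List.getD_eq_getElem?_getD,
              List.getElem?_eq_none (by simp only [List.length_append, List.length_singleton]; omega)]
            rfl
      have hget : ∀ v, children1.getD v PySem.Dict.empty =
          if v = node then (children.getD node PySem.Dict.empty).insert ch term.length
          else children.getD v PySem.Dict.empty := by
        intro v
        by_cases hv : v = node
        · subst hv
          rw [if_pos rfl, hc1, pvGetD_set_self _ _ _ _ (by simp only [List.length_append, List.length_singleton]; omega)]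
        · rw [if_neg hv, hc1, pvGetD_set_ne _ _ _ _ _ hv, happ]
      have hterm_len : term.length = children.length := hlen
      have hnew : ∀ v c u, (children1.getD v PySem.Dict.empty).get? c = some u →
          ((children.getD v PySem.Dict.empty).get? c = some u ∨ (v = node ∧ c = ch ∧ u = children.length)) := by
        intro v c u h
        rw [hget] at h
        by_cases hv : v = node
        · rw [if_pos hv] at h
          rw [PySem.Dict.get?_insert] at h
          by_cases hcc : c = ch
          · rw [if_pos hcc] at h
            right
            exact ⟨hv, hcc, by cases h; omega⟩
          · rw [if_neg hcc] at h
            subst hv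
            exact Or.inl h
        · rw [if_neg hv] at h
          exact Or.inl h
      have hpres1 : ∀ v c u, (children.getD v PySem.Dict.empty).get? c = some u →
          (children1.getD v PySem.Dict.empty).get? c = some u := by
        intro v c u h
        rw [hget]
        by_cases hv : v = node
        · subst hv
          rw [if_pos rfl, PySem.Dict.get?_insert]
          by_cases hcc : c = ch
          · subst hcc
            rw [hu] at h
            exact absurd h (by simp)
          · rw [if_neg hcc]
            exact h
        · rw [if_neg hv]
          exact h
      have h1' : ∀ v c u, (children1.getD v PySem.Dict.empty).get? c = some u →
          1 ≤ u ∧ u < children1.length := by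
        intro v c u h
        rcases hnew v c u h with h | ⟨_, _, rfl⟩
        · have := h1 v c u h
          omega
        · omega
      have h2' : ∀ v c u v' c', (children1.getD v PySem.Dict.empty).get? c = some u →
          (children1.getD v' PySem.Dict.empty).get? c' = some u → v = v' ∧ c = c' := by
        intro v c u v' c' ha hb
        rcases hnew v c u ha with ha' | ⟨rfl, rfl, rfl⟩
        · rcases hnew v' c' u hb with hb' | ⟨rfl, rfl, huL⟩
          · exact h2 v c u v' c' ha' hb'
          · have := h1 v c u ha'
            omega
        · rcases hnew v' c' children.length hb with hb' | ⟨rfl, rfl, _⟩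
          · have := h1 v' c' children.length hb'
            omega
          · exact ⟨rfl, rfl⟩
      obtain ⟨c1, c2, c3, c4, c5, c6, f, hf, hflt, hterm⟩ :=
        ih term1 children1 term.length (by omega) (by omega) h1' h2'
      have hLle : children.length + 1 ≤ (pvInsertB term1 children1 term.length rest).2.length := by
        rw [← hlen1c]; exact c2
      refine ⟨c1, by omega, ?_, ?_, c5, c6, f, ?_, hflt, ?_⟩
      · intro v c u h
        exact c3 v c u (hpres1 v c u h)
      · intro v c u h
        rcases c4 v c u h with h' | h'
        · rcases hnew v c u h' with h'' | ⟨_, _, rfl⟩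
          · exact Or.inl h''
          · exact Or.inr (le_refl _)
        · exact Or.inr (by omega)
      · simp only [pvFollow]
        have hedge : (children1.getD node PySem.Dict.empty).get? ch = some term.length := by
          rw [hget, if_pos rfl, PySem.Dict.get?_insert, if_pos rfl]
        rw [c3 node ch term.length hedge]
        exact hf
      · rw [hterm, ht1]
        have hk : (pvInsertB term1 children1 term.length rest).2.length - (children.length + 1) + 1 =
            (pvInsertB term1 children1 term.length rest).2.length - children.length := by omega
        rw [hlen1c, List.append_assoc]
        congr 2
        rw [← hk, List.replicate_succ, List.singleton_append]

-- one insertion adds exactly the inserted word to the stored set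
theorem pvInsert_look (term : List Bool) (children : List (PySem.Dict Char Nat)) (w : List Char)
    (hI : pvTInv term children) :
    pvTInv (pvInsertB term children 0 w).1 (pvInsertB term children 0 w).2 ∧
    ∀ ds, (pvLookFrom (pvInsertB term children 0 w).1 (pvInsertB term children 0 w).2 0 ds = true ↔
      (pvLookFrom term children 0 ds = true ∨ ds = w)) := by
  obtain ⟨hlen, hpos, h1, h2⟩ := hI
  obtain ⟨c1, c2, c3, c4, c5, c6, f, hf, hflt, hterm⟩ :=
    pvInsertB_spec w term children 0 hlen hpos h1 h2
  have hXlen : (term ++ List.replicate ((pvInsertB term children 0 w).2.length - children.length) false).length =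
      (pvInsertB term children 0 w).2.length := by
    simp [hlen]
    omega
  have hgetX : ∀ x, (pvInsertB term children 0 w).1.getD x false =
      (if x = f then true else if x < children.length then term.getD x false else false) := by
    intro x
    rw [hterm]
    by_cases hx : x = f
    · subst hx
      rw [if_pos rfl, pvGetD_set_self _ _ _ _ (by omega)]
    · rw [if_neg hx, pvGetD_set_ne _ _ _ _ _ hx]
      by_cases hxL : x < children.length
      · rw [if_pos hxL, List.getD_eq_getElem?_getD, List.getElem?_append_left (by omega),
          ← List.getD_eq_getElem?_getD]
      · rw [if_neg hxL, List.getD_eq_getElem?_getD, List.getElem?_append_right (by omega),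
          ← List.getD_eq_getElem?_getD, pvGetD_replicate]
  refine ⟨⟨c1, by omega, c5, c6⟩, ?_⟩
  intro ds
  constructor
  · intro h
    cases hfol : pvFollow (pvInsertB term children 0 w).2 0 ds with
    | none => rw [pvLookFrom_none _ _ _ _ hfol] at h; exact absurd h (by simp)
    | some x =>
      rw [pvLookFrom_some _ _ _ _ _ hfol] at h
      by_cases hx : x = f
      · subst hx
        right
        exact pvFollow_root_inj (pvInsertB term children 0 w).2 c5 c6 ds.length ds w x
          (le_refl _) hfol hf
      · rw [hgetX, if_neg hx] at h
        by_cases hxL : x < children.length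
        · rw [if_pos hxL] at h
          left
          have hold : pvFollow children 0 ds = some x :=
            pvFollow_origin children (pvInsertB term children 0 w).2 children.length rfl h1 c4
              ds 0 x hpos hfol hxL
          rw [pvLookFrom_some _ _ _ _ _ hold]
          exact h
        · rw [if_neg hxL] at h
          exact absurd h (by simp)
  · intro h
    rcases h with h | rfl
    · cases hfol : pvFollow children 0 ds with
      | none => rw [pvLookFrom_none _ _ _ _ hfol] at h; exact absurd h (by simp)
      | some x =>
        rw [pvLookFrom_some _ _ _ _ _ hfol] at h
        have hxL : x < term.length := by
          by_contra hc
          rw [List.getD_eq_getElem?_getD, List.getElem?_eq_none (by omega)] at h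
          exact absurd h (by simp)
        have hnew := pvFollow_preserve children (pvInsertB term children 0 w).2 c3 ds 0 x hfol
        rw [pvLookFrom_some _ _ _ _ _ hnew, hgetX]
        by_cases hx : x = f
        · rw [if_pos hx]
        · rw [if_neg hx, if_pos (by omega)]
          exact h
    · rw [pvLookFrom_some _ _ _ _ _ hf, hgetX, if_pos rfl]

-- cumulative meaning of the build loop
theorem pvBuildGo (ws : List String) :
    ∀ (term : List Bool) (children : List (PySem.Dict Char Nat)),
    pvTInv term children →
    pvTInv (ws.foldl (fun tc w => pvInsertB tc.1 tc.2 0 w.toList) (term, children)).1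
          (ws.foldl (fun tc w => pvInsertB tc.1 tc.2 0 w.toList) (term, children)).2 ∧
    ∀ ds, (pvLookFrom (ws.foldl (fun tc w => pvInsertB tc.1 tc.2 0 w.toList) (term, children)).1
            (ws.foldl (fun tc w => pvInsertB tc.1 tc.2 0 w.toList) (term, children)).2 0 ds = true ↔
          (pvLookFrom term children 0 ds = true ∨ ∃ w ∈ ws, w.toList = ds)) := by
  induction ws with
  | nil =>
    intro term children hI
    exact ⟨hI, fun ds => by simp⟩
  | cons w ws ih =>
    intro term children hI
    obtain ⟨hI1, hlook1⟩ := pvInsert_look term children w.toList hI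
    have hstep : (w :: ws).foldl (fun tc w => pvInsertB tc.1 tc.2 0 w.toList) (term, children) =
        ws.foldl (fun tc w => pvInsertB tc.1 tc.2 0 w.toList)
          ((pvInsertB term children 0 w.toList).1, (pvInsertB term children 0 w.toList).2) := by
      simp [List.foldl_cons]
    rw [hstep]
    obtain ⟨hI2, hlook2⟩ := ih (pvInsertB term children 0 w.toList).1
      (pvInsertB term children 0 w.toList).2 hI1
    refine ⟨hI2, ?_⟩
    intro ds
    rw [hlook2 ds, hlook1 ds]
    constructor
    · rintro ((h | rfl) | ⟨w', hw', hds⟩)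
      · exact Or.inl h
      · exact Or.inr ⟨w, by simp⟩
      · exact Or.inr ⟨w', by simp [hw'], hds⟩
    · rintro (h | ⟨w', hw', hds⟩)
      · exact Or.inl (Or.inl h)
      · rcases List.mem_cons.mp hw' with rfl | hmem
        · exact Or.inl (Or.inr hds.symm)
        · exact Or.inr ⟨w', hmem, hds⟩

-- the built trie stores exactly the vocabulary
theorem pvBuildTrie_look (ws : List String) :
    ∀ cs, pvLookFrom (pvBuildTrie ws).1 (pvBuildTrie ws).2 0 cs =
      pvMemV (PySem.Set.ofList ws) cs := by
  have hbaseI : pvTInv [false] [PySem.Dict.empty] := by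
    refine ⟨rfl, by simp, ?_, ?_⟩
    · intro v c u h
      have : (([PySem.Dict.empty] : List (PySem.Dict Char Nat)).getD v PySem.Dict.empty) = PySem.Dict.empty := by
        cases v with
        | zero => rfl
        | succ n => rw [List.getD_eq_getElem?_getD, List.getElem?_eq_none (by simp)]; rfl
      rw [this] at h
      simp [pysem] at h
    · intro v c u v' c' h h'
      have hx : (([PySem.Dict.empty] : List (PySem.Dict Char Nat)).getD v PySem.Dict.empty) = PySem.Dict.empty := by
        cases v with
        | zero => rfl
        | succ n => rw [List.getD_eq_getElem?_getD, List.getElem?_eq_none (by simp)]; rfl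
      rw [hx] at h
      simp [pysem] at h
  have hbaseL : ∀ ds, pvLookFrom [false] [PySem.Dict.empty] 0 ds = false := by
    intro ds
    cases ds with
    | nil => rfl
    | cons c ds =>
      apply pvLookFrom_none
      simp only [pvFollow]
      have : ((([PySem.Dict.empty] : List (PySem.Dict Char Nat)).getD 0 PySem.Dict.empty).get? c) = none := by
        simp [pysem]
      rw [this]
  obtain ⟨_, hlook⟩ := pvBuildGo ws [false] [PySem.Dict.empty] hbaseI
  intro cs
  have h1 : pvLookFrom (pvBuildTrie ws).1 (pvBuildTrie ws).2 0 cs = true ↔ ∃ w ∈ ws, w.toList = cs := by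
    rw [pvBuildTrie]
    rw [hlook cs]
    simp [hbaseL]
  have h2 : pvMemV (PySem.Set.ofList ws) cs = true ↔ ∃ w ∈ ws, w.toList = cs := by
    simp only [pvMemV, PySem.Set.contains]
    constructor
    · intro h
      have : String.ofList cs ∈ PySem.Set.ofList ws := by
        simpa using h
      have hmem : String.ofList cs ∈ ws := (PySem.Set.mem_ofList ws _).mp this
      exact ⟨String.ofList cs, hmem, by simp⟩
    · rintro ⟨w, hw, rfl⟩
      have : String.ofList w.toList = w := by simp
      rw [this]
      simpa using (PySem.Set.mem_ofList ws w).mpr hw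
  have := h1.trans h2.symm
  exact Bool.coe_iff_coe.mp this

-- ========== B-side: walk and scan characterization ==========

theorem pvWalkB_char (term : List Bool) (children : List (PySem.Dict Char Nat))
    (cs : List Char) (i : Nat) :
    ∀ (k j node : Nat) (reach : List Bool) (comp : Bool), j + k = cs.length → i ≤ j →
    reach.length = cs.length + 1 →
    (∀ t, (pvWalkB term children cs cs.length i node (List.range' j k) reach comp).1.getD t false =
      (reach.getD t false ||
        (decide (j < t) && decide (t < cs.length) && pvLookFrom term children node ((cs.drop j).take (t - j))))) ∧
    (pvWalkB term children cs cs.length i node (List.range' j k) reach comp).1.length = cs.length + 1 ∧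
    (pvWalkB term children cs cs.length i node (List.range' j k) reach comp).2 =
      (comp || (decide (0 < i) && decide (j < cs.length) && pvLookFrom term children node (cs.drop j))) := by
  intro k
  induction k with
  | zero =>
    intro j node reach comp hjk hij hlen
    have hj : j = cs.length := by omega
    subst hj
    rw [List.range'_zero]
    simp only [pvWalkB]
    refine ⟨?_, hlen, by simp⟩
    intro t
    by_cases h : t < cs.length
    · have : (decide (cs.length < t) : Bool) = false := by simp; omega
      rw [this]; simp
    · have : (decide (t < cs.length) : Bool) = false := by simp; omega
      rw [this]; simp
  | succ k ih =>
    intro j node reach comp hjk hij hlen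
    have hjn : j < cs.length := by omega
    have hidx : cs.getD j ' ' = cs[j] := List.getD_eq_getElem cs ' ' hjn
    have hdropj : cs.drop j = cs[j] :: cs.drop (j+1) := List.drop_eq_getElem_cons hjn
    have htake : ∀ t, j < t → (cs.drop j).take (t - j) =
        cs[j] :: (cs.drop (j+1)).take (t - (j+1)) := by
      intro t ht
      rw [hdropj, show t - j = (t - (j+1)) + 1 from by omega, List.take_succ_cons]
    rw [List.range'_succ]
    simp only [pvWalkB]
    rw [hidx]
    cases he : (children.getD node PySem.Dict.empty).get? cs[j] with
    | none =>
      have hlookN : ∀ rest, pvLookFrom term children node (cs[j] :: rest) = false := by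
        intro rest
        apply pvLookFrom_none
        simp only [pvFollow]
        rw [he]
      refine ⟨?_, hlen, ?_⟩
      · intro t
        by_cases h1 : j < t
        · by_cases h2 : t < cs.length
          · rw [htake t h1, hlookN]
            simp
          · have : (decide (t < cs.length) : Bool) = false := by simp; omega
            rw [this]; simp
        · have : (decide (j < t) : Bool) = false := by simp; omega
          rw [this]; simp
      · rw [hdropj, hlookN]
        simp
    | some nd =>
      have hstep : ∀ rest, pvLookFrom term children node (cs[j] :: rest) =
          pvLookFrom term children nd rest := by
        intro rest
        simp only [pvLookFrom, pvFollow]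
        rw [he]
      have hnil : pvLookFrom term children nd [] = term.getD nd false :=
        pvLookFrom_some term children nd nd [] rfl
      dsimp only
      by_cases hterm : term.getD nd false = true
      · rw [if_pos hterm]
        by_cases hj1 : j + 1 < cs.length
        · rw [if_pos hj1]
          obtain ⟨ihg, ihl, ihc⟩ := ih (j+1) nd (reach.set (j+1) true) comp (by omega) (by omega)
            (by simp [hlen])
          refine ⟨?_, ihl, ?_⟩
          · intro t
            rw [ihg t]
            by_cases ht : t = j + 1
            · subst ht
              rw [pvGetD_set_self _ _ _ _ (by omega)]
              have d1 : (decide (j + 1 < j + 1) : Bool) = false := by simp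
              have d2 : (decide (j < j + 1) : Bool) = true := by simp
              have d3 : (decide (j + 1 < cs.length) : Bool) = true := by simp [hj1]
              rw [d1, d2, d3, htake (j+1) (by omega), hstep]
              have : (cs.drop (j+1)).take (j+1-(j+1)) = [] := by simp
              rw [this, hnil, hterm]
              simp
            · rw [pvGetD_set_ne _ _ _ _ _ ht]
              by_cases h1 : j < t
              · have h1' : j + 1 < t := by omega
                have d1 : (decide (j + 1 < t) : Bool) = true := by simp [h1']
                have d2 : (decide (j < t) : Bool) = true := by simp [h1]
                rw [d1, d2, htake t h1, hstep]
              · have d1 : (decide (j + 1 < t) : Bool) = false := by simp; omega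
                have d2 : (decide (j < t) : Bool) = false := by simp; omega
                rw [d1, d2]
                simp
          · rw [ihc, hdropj, hstep]
            have d3 : (decide (j + 1 < cs.length) : Bool) = true := by simp [hj1]
            have d4 : (decide (j < cs.length) : Bool) = true := by simp [hjn]
            rw [d3, d4]
        · rw [if_neg hj1]
          have hj1' : j + 1 = cs.length := by omega
          by_cases hi : 0 < i
          · rw [if_pos hi]
            obtain ⟨ihg, ihl, ihc⟩ := ih (j+1) nd reach true (by omega) (by omega) hlen
            refine ⟨?_, ihl, ?_⟩
            · intro t
              rw [ihg t]
              by_cases h2 : t < cs.length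
              · have d1 : (decide (j + 1 < t) : Bool) = false := by simp; omega
                have d2 : (decide (j < t) : Bool) = false := by simp; omega
                rw [d1, d2]
                simp
              · have d3 : (decide (t < cs.length) : Bool) = false := by simp; omega
                rw [d3]
                simp
            · rw [ihc]
              have d1 : (decide (j + 1 < cs.length) : Bool) = false := by simp; omega
              have d2 : (decide (j < cs.length) : Bool) = true := by simp [hjn]
              have hde : cs.drop (j+1) = [] := by rw [hj1', List.drop_length]
              rw [d1, d2, hdropj, hstep, hde, hnil, hterm]
              simp [hi]
          · rw [if_neg hi]
            obtain ⟨ihg, ihl, ihc⟩ := ih (j+1) nd reach comp (by omega) (by omega) hlen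
            refine ⟨?_, ihl, ?_⟩
            · intro t
              rw [ihg t]
              by_cases h2 : t < cs.length
              · have d1 : (decide (j + 1 < t) : Bool) = false := by simp; omega
                have d2 : (decide (j < t) : Bool) = false := by simp; omega
                rw [d1, d2]
                simp
              · have d3 : (decide (t < cs.length) : Bool) = false := by simp; omega
                rw [d3]
                simp
            · rw [ihc]
              have d0 : (decide (0 < i) : Bool) = false := by simp; omega
              rw [d0]
              simp
      · have hterm' : term.getD nd false = false := by simpa using hterm
        rw [if_neg (by rw [hterm']; simp)]
        obtain ⟨ihg, ihl, ihc⟩ := ih (j+1) nd reach comp (by omega) (by omega) hlen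
        refine ⟨?_, ihl, ?_⟩
        · intro t
          rw [ihg t]
          by_cases ht : t = j + 1
          · subst ht
            have d1 : (decide (j + 1 < j + 1) : Bool) = false := by simp
            have d2 : (decide (j < j + 1) : Bool) = true := by simp
            rw [d1, d2, htake (j+1) (by omega), hstep]
            have : (cs.drop (j+1)).take (j+1-(j+1)) = [] := by simp
            rw [this, hnil, hterm']
            simp
          · by_cases h1 : j < t
            · have h1' : j + 1 < t := by omega
              have d1 : (decide (j + 1 < t) : Bool) = true := by simp [h1']
              have d2 : (decide (j < t) : Bool) = true := by simp [h1]
              rw [d1, d2, htake t h1, hstep]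
            · have d1 : (decide (j + 1 < t) : Bool) = false := by simp; omega
              have d2 : (decide (j < t) : Bool) = false := by simp; omega
              rw [d1, d2]
              simp
        · rw [ihc, hdropj, hstep]
          have d4 : (decide (j < cs.length) : Bool) = true := by simp [hjn]
          rw [d4]
          by_cases hj1 : j + 1 < cs.length
          · have d3 : (decide (j + 1 < cs.length) : Bool) = true := by simp [hj1]
            rw [d3]
          · have hj1' : j + 1 = cs.length := by omega
            have d3 : (decide (j + 1 < cs.length) : Bool) = false := by simp; omega
            rw [d3]
            have hde : cs.drop (j+1) = [] := by
              rw [hj1', List.drop_length]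
            rw [hde, hnil, hterm']
            simp

-- forward completeness: the split-point formula is exactly breakability
theorem pvBrk_char (m : List Char → Bool) (cs : List Char) :
    ∀ t, 1 ≤ t → t ≤ cs.length →
    ((∃ l, l < t ∧ (l = 0 ∨ pvBrk m (cs.take l)) ∧ m ((cs.drop l).take (t - l)) = true) ↔
      pvBrk m (cs.take t)) := by
  intro t ht1 ht2
  have hlt : (cs.take t).length = t := by rw [List.length_take]; omega
  constructor
  · rintro ⟨l, hlt2, hl0, hm⟩
    apply pvBrk_last.mpr
    rcases hl0 with rfl | hbrk
    · left
      constructor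
      · simpa using hm
      · exact List.ne_nil_of_length_pos (by omega)
    · have hl1 : 1 ≤ l := by
        by_contra hc
        have : l = 0 := by omega
        subst this
        exact pvBrk_ne_nil hbrk (by simp)
      right
      refine ⟨l, hl1, by omega, ?_, ?_⟩
      · rw [List.take_take, min_eq_left (by omega)]
        exact hbrk
      · rw [List.drop_take]
        exact hm
  · intro h
    rcases pvBrk_last.mp h with ⟨hm, _⟩ | ⟨l, hl1, hl2, hb, hm⟩
    · exact ⟨0, by omega, Or.inl rfl, by simpa using hm⟩
    · rw [hlt] at hl2
      rw [List.take_take, min_eq_left (by omega)] at hb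
      rw [List.drop_take] at hm
      exact ⟨l, hl2, Or.inr hb, hm⟩

theorem pvCheckB_char (term : List Bool) (children : List (PySem.Dict Char Nat)) (cs : List Char) :
    ∀ (k i : Nat) (reach : List Bool) (comp : Bool), i + k = cs.length →
    reach.getD 0 false = true → reach.length = cs.length + 1 →
    (∀ t, 1 ≤ t → t < cs.length → (reach.getD t false = true ↔
      ∃ l, l < i ∧ l < t ∧ (l = 0 ∨ pvBrk (pvLookFrom term children 0) (cs.take l)) ∧
        pvLookFrom term children 0 ((cs.drop l).take (t - l)) = true)) →
    (comp = true ↔ ∃ l, 1 ≤ l ∧ l < i ∧ pvBrk (pvLookFrom term children 0) (cs.take l) ∧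
      pvLookFrom term children 0 (cs.drop l) = true) →
    (pvCheckB term children cs cs.length (List.range' i k) reach comp = true ↔
      pvCompound (pvLookFrom term children 0) cs) := by
  intro k
  induction k with
  | zero =>
    intro i reach comp hik h0 hlen hinv hcomp
    have hi : i = cs.length := by omega
    subst hi
    rw [List.range'_zero]
    simp only [pvCheckB]
    rw [hcomp]
    exact Iff.rfl
  | succ k ih =>
    intro i reach comp hik h0 hlen hinv hcomp
    have hin : i < cs.length := by omega
    rw [List.range'_succ]
    simp only [pvCheckB]
    by_cases hri : reach.getD i false = true
    · rw [if_pos hri]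
      have hBrkI : i = 0 ∨ pvBrk (pvLookFrom term children 0) (cs.take i) := by
        by_cases hi0 : i = 0
        · exact Or.inl hi0
        · right
          have h1i : 1 ≤ i := by omega
          have := (hinv i h1i hin).mp hri
          obtain ⟨l, hl1, hl2, hl0, hm⟩ := this
          exact (pvBrk_char (pvLookFrom term children 0) cs i h1i (by omega)).mp ⟨l, hl2, hl0, hm⟩
      obtain ⟨wg, wl, wc⟩ := pvWalkB_char term (children := children) cs i (cs.length - i) i 0
        reach comp (by omega) (le_refl i) hlen
      apply ih (i+1)
        (pvWalkB term children cs cs.length i 0 (List.range' i (cs.length - i)) reach comp).1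
        (pvWalkB term children cs cs.length i 0 (List.range' i (cs.length - i)) reach comp).2
        (by omega)
      · rw [wg 0]
        have d : (decide (i < 0) : Bool) = false := by simp
        rw [d, h0]
        simp
      · exact wl
      · intro t ht1 ht2
        rw [wg t]
        have d2 : (decide (t < cs.length) : Bool) = true := by simp [ht2]
        rw [d2]
        constructor
        · intro h
          rcases Bool.or_eq_true_iff.mp h with h | h
          · obtain ⟨l, hl1, hl2, hl0, hm⟩ := (hinv t ht1 ht2).mp h
            exact ⟨l, by omega, hl2, hl0, hm⟩
          · simp only [Bool.and_eq_true, decide_eq_true_eq] at h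
            exact ⟨i, by omega, h.1.1, hBrkI, h.2⟩
        · rintro ⟨l, hl1, hl2, hl0, hm⟩
          by_cases hli : l = i
          · subst hli
            have d1 : (decide (l < t) : Bool) = true := by simp [hl2]
            rw [d1, hm]
            simp
          · have : reach.getD t false = true := (hinv t ht1 ht2).mpr ⟨l, by omega, hl2, hl0, hm⟩
            rw [this]
            simp
      · rw [wc]
        have d2 : (decide (i < cs.length) : Bool) = true := by simp [hin]
        rw [d2]
        constructor
        · intro h
          rcases Bool.or_eq_true_iff.mp h with h | h
          · obtain ⟨l, hl1, hl2, hb, hm⟩ := hcomp.mp h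
            exact ⟨l, hl1, by omega, hb, hm⟩
          · simp only [Bool.and_eq_true, decide_eq_true_eq] at h
            refine ⟨i, by omega, by omega, ?_, h.2⟩
            rcases hBrkI with h0' | hb
            · omega
            · exact hb
        · rintro ⟨l, hl1, hl2, hb, hm⟩
          by_cases hli : l = i
          · subst hli
            have d0 : (decide (0 < l) : Bool) = true := by simp; omega
            rw [d0, hm]
            simp
          · have : comp = true := hcomp.mpr ⟨l, hl1, by omega, hb, hm⟩
            rw [this]
            simp
    · rw [if_neg hri]
      have hri' : reach.getD i false = false := by simpa using hri
      have hi1 : 1 ≤ i := by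
        by_contra hc
        have : i = 0 := by omega
        subst this
        rw [h0] at hri'
        exact absurd hri' (by simp)
      have hnbrk : ¬ pvBrk (pvLookFrom term children 0) (cs.take i) := by
        intro hb
        obtain ⟨l, hl2, hl0, hm⟩ :=
          (pvBrk_char (pvLookFrom term children 0) cs i hi1 (by omega)).mpr hb
        have := (hinv i hi1 hin).mpr ⟨l, hl2, hl2, hl0, hm⟩
        rw [this] at hri'
        exact absurd hri' (by simp)
      apply ih (i+1) reach comp (by omega) h0 hlen
      · intro t ht1 ht2
        rw [hinv t ht1 ht2]
        constructor
        · rintro ⟨l, hl1, hl2, hl0, hm⟩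
          exact ⟨l, by omega, hl2, hl0, hm⟩
        · rintro ⟨l, hl1, hl2, hl0, hm⟩
          by_cases hli : l = i
          · subst hli
            rcases hl0 with h0' | hb
            · omega
            · exact absurd hb hnbrk
          · exact ⟨l, by omega, hl2, hl0, hm⟩
      · rw [hcomp]
        constructor
        · rintro ⟨l, hl1, hl2, hb, hm⟩
          exact ⟨l, hl1, by omega, hb, hm⟩
        · rintro ⟨l, hl1, hl2, hb, hm⟩
          by_cases hli : l = i
          · subst hli
            exact absurd hb hnbrk
          · exact ⟨l, hl1, by omega, hb, hm⟩

-- the two compound tests agree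
theorem pvCompound_eq (ws : List String) (hv : ws ≠ []) (w : String) :
    isCompoundWord w (PySem.Set.ofList ws) = isCompoundB (pvBuildTrie ws).1 (pvBuildTrie ws).2 w := by
  have hmf : pvLookFrom (pvBuildTrie ws).1 (pvBuildTrie ws).2 0 = pvMemV (PySem.Set.ofList ws) :=
    funext (pvBuildTrie_look ws)
  have hne : PySem.Set.ofList ws ≠ [] := by
    cases ws with
    | nil => exact absurd rfl hv
    | cons a tl =>
      have hmem := (PySem.Set.mem_ofList (a :: tl) a).mpr (by simp)
      intro h0
      rw [h0] at hmem
      simp at hmem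
  have hvl : ¬ (PySem.Set.ofList ws).length < 1 := by
    intro hlt
    have : (PySem.Set.ofList ws).length = 0 := by omega
    exact hne (List.length_eq_zero_iff.mp this)
  have hB : isCompoundB (pvBuildTrie ws).1 (pvBuildTrie ws).2 w = true ↔
      pvCompound (pvMemV (PySem.Set.ofList ws)) w.toList := by
    rw [isCompoundB]
    have hch := pvCheckB_char (pvBuildTrie ws).1 (pvBuildTrie ws).2 w.toList
      w.toList.length 0 (true :: List.replicate w.toList.length false) false
      (by omega) rfl (by simp) ?_ ?_
    · rw [hmf] at hch
      exact hch
    · intro t ht1 ht2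
      have hz : (true :: List.replicate w.toList.length false).getD t false = false := by
        cases t with
        | zero => omega
        | succ t' => rw [List.getD_cons_succ, pvGetD_replicate]
      rw [hz]
      constructor
      · intro h
        exact absurd h (by simp)
      · rintro ⟨l, hl, _⟩
        omega
    · constructor
      · intro h
        exact absurd h (by simp)
      · rintro ⟨l, hl1, hl2, _⟩
        omega
  have hA : isCompoundWord w (PySem.Set.ofList ws) = true ↔
      pvCompound (pvMemV (PySem.Set.ofList ws)) w.toList := by
    rw [isCompoundWord, if_neg hvl]
    by_cases h0 : w.toList.length < 1
    · rw [if_pos h0]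
      constructor
      · intro h
        exact absurd h (by simp)
      · rintro ⟨l, hl1, hl2, _, _⟩
        omega
    · rw [if_neg h0]
      exact pvOuterA_char (PySem.Set.ofList ws) w.toList (w.toList.length - 1) 1
        (List.replicate (w.toList.length + 1) false) (by omega) (le_refl 1)
        ⟨by simp, pvGetD_replicate _ _,
         fun j hj1 hj2 => absurd hj2 (by omega),
         fun j hj1 hj2 => by
           rw [pvGetD_replicate]
           constructor
           · intro h
             exact absurd h (by simp)
           · rintro ⟨l, hl1, hl2, _, _⟩
             omega⟩
  exact Bool.coe_iff_coe.mp (hA.trans hB.symm)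

-- ===== VERDICT (by name: the statement is the Claim_ definition above) =====
theorem simpleWords_spec : Claim_equal_simpleWords := by
  intro words _
  show simpleWords words = simpleWords_alt words
  cases words with
  | none => rfl
  | some ws =>
    cases ws with
    | nil => rfl
    | cons w tl =>
      simp only [simpleWords, simpleWords_alt]
      rw [if_neg (by simp), if_neg (by simp)]
      have hfun : (fun (acc : List String) (x : String) =>
          if !(isCompoundWord x (PySem.Set.ofList (w :: tl))) then acc ++ [x] else acc) =
          (fun (acc : List String) (x : String) =>
          if !(isCompoundB (pvBuildTrie (w :: tl)).1 (pvBuildTrie (w :: tl)).2 x) then acc ++ [x] else acc) := by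
        funext acc x
        rw [pvCompound_eq (w :: tl) (by simp) x]
      rw [hfun]
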